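-- pv_equiv track=rewrite | github.com/stakiran/scbjson2ghpages | scbjson2ghpages.py | count_first_space_or_tab
-- ===== SOURCE A (Python) =====
-- def count_first_space_or_tab(s):
--     count = 0
--     for c in s:
--         if c == '\t':
--             count += 1
--             continue
--         if c == ' ':
--             count += 1
--             continue
--         break
--     return count
-- ===== SOURCE B (Python) =====
-- def count_first_space_or_tab(s):
--     return len(s) - len(s.lstrip(' \t'))
-- ===== Notes on version B (the rewrite author's own statement) =====
-- stated objective: idiomatic
-- what changed: Replaces the explicit counter loop with a single lstrip of the leading spaces/tabs and a length difference (no loop, no counter).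
import Mathlib
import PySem

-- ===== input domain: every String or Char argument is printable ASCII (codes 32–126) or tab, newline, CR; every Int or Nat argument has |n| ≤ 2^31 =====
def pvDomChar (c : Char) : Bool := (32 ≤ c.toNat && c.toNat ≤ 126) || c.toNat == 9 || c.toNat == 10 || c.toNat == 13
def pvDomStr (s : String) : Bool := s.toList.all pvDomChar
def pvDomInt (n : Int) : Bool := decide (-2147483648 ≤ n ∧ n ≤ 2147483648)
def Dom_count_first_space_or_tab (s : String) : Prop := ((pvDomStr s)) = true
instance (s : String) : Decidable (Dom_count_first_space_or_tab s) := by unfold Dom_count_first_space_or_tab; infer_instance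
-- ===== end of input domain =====

-- B replaces A's counter loop with lstrip(' \t') and a length difference (idiomatic; return value only).

-- ===== PORT A =====
-- the for-loop with break, as structural recursion carrying the counter
def countLoopA : List Char → Int → Int
  | [], count => count
  | c :: rest, count =>
    if c = '\t' then countLoopA rest (count + 1)
    else if c = ' ' then countLoopA rest (count + 1)
    else count

def count_first_space_or_tab (s : String) : Int := countLoopA s.toList 0

-- ===== PORT B =====
-- s.lstrip(' \t') ported by hand as dropWhile of the two characters (exact: lstrip with a
-- chars argument drops exactly the leading run of characters from that set)
def count_first_space_or_tab_alt (s : String) : Int :=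
  (s.toList.length : Int) -
    ((s.toList.dropWhile (fun c => c == ' ' || c == '\t')).length : Int)

-- ===== PRECONDITION & SPEC =====
def Spec_count_first_space_or_tab (s : String) (out : Int) : Prop := out = count_first_space_or_tab_alt s
instance (s : String) (out : Int) : Decidable (Spec_count_first_space_or_tab s out) := by unfold Spec_count_first_space_or_tab; infer_instance

-- ===== CLAIM (what is proved, stated in full; the proofs are below) =====
def Claim_equal_count_first_space_or_tab : Prop := ∀ (s : String), Dom_count_first_space_or_tab s → Spec_count_first_space_or_tab s (count_first_space_or_tab s)

-- ===== LEMMAS AND PROOFS =====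
theorem countLoopA_eq (l : List Char) (count : Int) :
    countLoopA l count =
      count + ((l.length : Int) - ((l.dropWhile (fun c => c == ' ' || c == '\t')).length : Int)) := by
  induction l generalizing count with
  | nil => simp [countLoopA]
  | cons c rest ih =>
    by_cases ht : c = '\t'
    · simp [countLoopA, ht, List.dropWhile, ih]; ring
    · by_cases hs : c = ' '
      · simp [countLoopA, ht, hs, List.dropWhile, ih]; ring
      · have h1 : (c == ' ' || c == '\t') = false := by simp [ht, hs]
        simp [countLoopA, ht, hs, List.dropWhile, h1]

-- ===== VERDICT (by name: the statement is the Claim_ definition above) =====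
theorem count_first_space_or_tab_spec : Claim_equal_count_first_space_or_tab := by
  intro s _
  unfold Spec_count_first_space_or_tab count_first_space_or_tab count_first_space_or_tab_alt
  rw [countLoopA_eq]; ring
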